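-- pv_equiv track=rewrite | github.com/mrgreen000/siteagency.ro | check_domains.py | extract_whois_info
-- ===== SOURCE A (Python) =====
-- def extract_whois_info(whois_response):
--     """
--     Extract registrar and registration date from WHOIS response
--
--     Args:
--         whois_response: WHOIS query response text
--
--     Returns:
--         dict: Dictionary with registrar and registration_date
--     """
--     info = {
--         'registrar': 'N/A',
--         'registration_date': 'N/A'
--     }
--
--     lines = whois_response.split('\n')
--     for line in lines:
--         line_lower = line.lower().strip()
--
--         # Extract registrar
--         if line_lower.startswith('registrar:'):
--             info['registrar'] = line.split(':', 1)[1].strip()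
--
--         # Extract registration date (various formats)
--         if line_lower.startswith('registered on:') or line_lower.startswith('registration date:'):
--             info['registration_date'] = line.split(':', 1)[1].strip()
--
--     return info
-- ===== SOURCE B (Python) =====
-- def extract_whois_info(whois_response):
--     lines = whois_response.split('\n')
--
--     def last_value(prefixes):
--         # scan backwards; the first match seen is the last match of the file
--         for line in reversed(lines):
--             low = line.lower().strip()
--             if any(low.startswith(p) for p in prefixes):
--                 return line.split(':', 1)[1].strip()
--         return 'N/A'
--
--     return {
--         'registrar': last_value(('registrar:',)),
--         'registration_date': last_value(('registered on:', 'registration date:')),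
--     }
-- ===== Notes on version B (the rewrite author's own statement) =====
-- stated objective: alternative
-- what changed: B replaces A's single forward pass over all lines with mutable last-write-wins dict updates by two independent backward scans that return at the first (i.e. last) matching line per field.
import Mathlib
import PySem

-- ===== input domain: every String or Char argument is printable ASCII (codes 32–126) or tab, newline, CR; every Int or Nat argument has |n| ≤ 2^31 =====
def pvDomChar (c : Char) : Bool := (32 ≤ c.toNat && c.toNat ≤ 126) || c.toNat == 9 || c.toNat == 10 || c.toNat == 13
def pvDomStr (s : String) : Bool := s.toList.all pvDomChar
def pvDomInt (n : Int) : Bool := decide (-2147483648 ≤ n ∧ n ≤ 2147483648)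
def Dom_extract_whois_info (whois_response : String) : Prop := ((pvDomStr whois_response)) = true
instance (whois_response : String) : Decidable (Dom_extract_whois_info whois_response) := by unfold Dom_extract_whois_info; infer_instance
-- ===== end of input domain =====

-- B replaces A's single forward pass with last-write-wins updates by two independent
-- backward scans returning at the first (= last) matching line per field (objective: alternative).

-- ===== PORT A =====
-- line.split(':', 1)[1].strip(); the branch guarding it guarantees a ':' is present,
-- so the `.getD` defaults are never reached there.
def pvAfterColon (line : String) : String :=
  PySem.Str.strip ((PySem.List.pyGet? ((PySem.Str.splitMax? line ":" 1).getD []) 1).getD "")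

def pvStepA (st : String × String) (line : String) : String × String :=
  let low := PySem.Str.strip (PySem.Str.lower line)
  let st1 := if PySem.Str.startswith low "registrar:" then (pvAfterColon line, st.2) else st
  if PySem.Str.startswith low "registered on:" || PySem.Str.startswith low "registration date:" then
    (st1.1, pvAfterColon line)
  else st1

def extract_whois_info (whois_response : String) : List (String × String) :=
  let lines := (PySem.Str.split? whois_response "\n").getD []
  let st := lines.foldl pvStepA ("N/A", "N/A")
  [("registrar", st.1), ("registration_date", st.2)]

-- ===== PORT B =====
def pvMatches (prefixes : List String) (line : String) : Bool :=
  prefixes.any (fun p => PySem.Str.startswith (PySem.Str.strip (PySem.Str.lower line)) p)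

def pvLastValue (lines : List String) (prefixes : List String) : String :=
  match lines.reverse.find? (pvMatches prefixes) with
  | some line => pvAfterColon line
  | none => "N/A"

def extract_whois_info_alt (whois_response : String) : List (String × String) :=
  let lines := (PySem.Str.split? whois_response "\n").getD []
  [("registrar", pvLastValue lines ["registrar:"]),
   ("registration_date", pvLastValue lines ["registered on:", "registration date:"])]

-- ===== PRECONDITION & SPEC =====
def Spec_extract_whois_info (whois_response : String) (out : List (String × String)) : Prop := out = extract_whois_info_alt whois_response
instance (whois_response : String) (out : List (String × String)) : Decidable (Spec_extract_whois_info whois_response out) := by unfold Spec_extract_whois_info; infer_instance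

-- ===== CLAIM (what is proved, stated in full; the proofs are below) =====
def Claim_equal_extract_whois_info : Prop := ∀ (whois_response : String), Dom_extract_whois_info whois_response → Spec_extract_whois_info whois_response (extract_whois_info whois_response)

-- ===== LEMMAS AND PROOFS =====

def pvRegP (line : String) : Bool :=
  PySem.Str.startswith (PySem.Str.strip (PySem.Str.lower line)) "registrar:"

def pvDateP (line : String) : Bool :=
  PySem.Str.startswith (PySem.Str.strip (PySem.Str.lower line)) "registered on:" ||
  PySem.Str.startswith (PySem.Str.strip (PySem.Str.lower line)) "registration date:"

theorem pvStepA_fst (st : String × String) (line : String) :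
    (pvStepA st line).1 = if pvRegP line then pvAfterColon line else st.1 := by
  simp only [pvStepA, pvRegP]
  split_ifs <;> simp_all

theorem pvStepA_snd (st : String × String) (line : String) :
    (pvStepA st line).2 = if pvDateP line then pvAfterColon line else st.2 := by
  simp only [pvStepA, pvDateP]
  split_ifs <;> simp_all

theorem pvFold_fst (lines : List String) (st : String × String) :
    (lines.foldl pvStepA st).1 =
      match lines.reverse.find? pvRegP with
      | some l => pvAfterColon l
      | none => st.1 := by
  induction lines generalizing st with
  | nil => simp
  | cons l ls ih =>
    simp only [List.foldl_cons, ih, List.reverse_cons, List.find?_append]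
    cases h : ls.reverse.find? pvRegP with
    | some l' => simp [Option.or]
    | none =>
      simp only [Option.none_or, List.find?_cons, pvStepA_fst]
      cases hp : pvRegP l <;> simp

theorem pvFold_snd (lines : List String) (st : String × String) :
    (lines.foldl pvStepA st).2 =
      match lines.reverse.find? pvDateP with
      | some l => pvAfterColon l
      | none => st.2 := by
  induction lines generalizing st with
  | nil => simp
  | cons l ls ih =>
    simp only [List.foldl_cons, ih, List.reverse_cons, List.find?_append]
    cases h : ls.reverse.find? pvDateP with
    | some l' => simp [Option.or]
    | none =>
      simp only [Option.none_or, List.find?_cons, pvStepA_snd]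
      cases hp : pvDateP l <;> simp

theorem pvMatches_reg : pvMatches ["registrar:"] = pvRegP := by
  funext l; simp [pvMatches, pvRegP]

theorem pvMatches_date : pvMatches ["registered on:", "registration date:"] = pvDateP := by
  funext l; simp [pvMatches, pvDateP]

-- ===== VERDICT (by name: the statement is the Claim_ definition above) =====
theorem extract_whois_info_spec : Claim_equal_extract_whois_info := by
  intro w _
  show _ = _
  simp only [extract_whois_info, extract_whois_info_alt, pvLastValue,
    pvMatches_reg, pvMatches_date, pvFold_fst, pvFold_snd]
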